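-- pv_equiv track=rewrite | github.com/nadineloepfe/mirrornode-transactionsize-check | transaction_endpoint/find_sequence_pattern.py | is_valid_big_transaction
-- ===== SOURCE A (Python) =====
-- def is_valid_big_transaction(sequence):
--     """
--     Checks if a given sequence is a valid big transaction (has FILECREATE, FILEAPPEND, ETHEREUMTRANSACTION, FILEDELETE).
--     """
--     types_in_sequence = [tx['type'] for tx in sequence]
--     append_count = types_in_sequence.count('FILEAPPEND')
--
--     if 'FILECREATE' in types_in_sequence and \
--             append_count >= 1 and \
--             'ETHEREUMTRANSACTION' in types_in_sequence and \
--             'FILEDELETE' in types_in_sequence: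
--
--         # check correct order of operations: FILECREATE -> FILEAPPEND -> ETHEREUMTRANSACTION -> FILEDELETE
--         filecreate_index = types_in_sequence.index('FILECREATE')
--         filedelete_index = types_in_sequence.index('FILEDELETE')
--         ethereum_tx_indices = [idx for idx, t in enumerate(types_in_sequence) if t == 'ETHEREUMTRANSACTION']
--         last_append_index = max(idx for idx, t in enumerate(types_in_sequence) if t == 'FILEAPPEND')
--
--         if filecreate_index < last_append_index < min(ethereum_tx_indices) < filedelete_index:
--             entity_ids = set(tx['entity_id'] for tx in sequence if tx['type'] in ['FILECREATE', 'FILEAPPEND', 'FILEDELETE'])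
--             if len(entity_ids) == 1:
--                 return True, append_count
--             else:
--                 return False, append_count
--
--     return False, append_count
-- ===== SOURCE B (Python) =====
-- def is_valid_big_transaction(sequence):
--     """
--     Single-pass scan: accumulate the FILEAPPEND count, the first index of
--     FILECREATE/ETHEREUMTRANSACTION/FILEDELETE and the last index of FILEAPPEND,
--     then test the ordering and (only then) the shared entity id.
--     """
--     append_count = 0
--     create_idx = eth_idx = delete_idx = last_append_idx = None
--     for i, tx in enumerate(sequence):
--         t = tx['type']
--         if t == 'FILEAPPEND':
--             append_count += 1
--             last_append_idx = i
--         elif t == 'FILECREATE':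
--             if create_idx is None:
--                 create_idx = i
--         elif t == 'ETHEREUMTRANSACTION':
--             if eth_idx is None:
--                 eth_idx = i
--         elif t == 'FILEDELETE':
--             if delete_idx is None:
--                 delete_idx = i
--     if create_idx is not None and last_append_idx is not None \
--             and eth_idx is not None and delete_idx is not None:
--         if create_idx < last_append_idx < eth_idx < delete_idx:
--             entity_ids = set(tx['entity_id'] for tx in sequence
--                              if tx['type'] in ['FILECREATE', 'FILEAPPEND', 'FILEDELETE'])
--             return len(entity_ids) == 1, append_count
--     return False, append_count
-- ===== Notes on version B (the rewrite author's own statement) =====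
-- stated objective: alternative
-- what changed: Replaces A's six separate passes over the sequence (type-list build, count, two index() scans, two enumerate comprehensions with min/max) by one accumulating scan that tracks the append count, the first FILECREATE/ETHEREUMTRANSACTION/FILEDELETE index and the last FILEAPPEND index, deferring the entity-id set to the post-ordering branch.
import Mathlib
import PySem

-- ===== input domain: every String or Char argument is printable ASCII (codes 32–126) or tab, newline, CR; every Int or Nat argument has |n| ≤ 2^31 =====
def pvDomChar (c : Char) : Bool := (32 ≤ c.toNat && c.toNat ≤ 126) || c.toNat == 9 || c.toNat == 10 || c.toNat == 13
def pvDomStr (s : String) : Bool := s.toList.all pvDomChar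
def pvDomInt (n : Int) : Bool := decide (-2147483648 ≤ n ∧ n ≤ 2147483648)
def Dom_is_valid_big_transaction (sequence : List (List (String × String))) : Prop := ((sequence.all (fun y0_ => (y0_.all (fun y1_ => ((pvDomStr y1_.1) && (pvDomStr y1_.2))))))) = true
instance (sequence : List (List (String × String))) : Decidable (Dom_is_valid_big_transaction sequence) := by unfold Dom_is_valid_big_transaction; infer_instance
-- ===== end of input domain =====

-- B replaces A's six passes over the sequence by one accumulating scan (append count,
-- first FILECREATE/ETHEREUMTRANSACTION/FILEDELETE index, last FILEAPPEND index); same cost class.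

-- ===== PORT A =====
-- tx['type'] / tx['entity_id']: Pre_ guarantees the key is present, so getD "" is exact there
def is_valid_big_transaction (sequence : List (List (String × String))) : Bool × Int :=
  let types := sequence.map (fun tx => ((PySem.Dict.mk tx).get? "type").getD "")
  let appendCount : Int := (PySem.List.count types "FILEAPPEND" : Int)
  if types.contains "FILECREATE" && decide (1 ≤ appendCount) &&
     types.contains "ETHEREUMTRANSACTION" && types.contains "FILEDELETE" then
    let filecreateIndex : Int := ((PySem.List.index? types "FILECREATE").getD 0 : Nat)
    let filedeleteIndex : Int := ((PySem.List.index? types "FILEDELETE").getD 0 : Nat)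
    let ethIndices : List Int :=
      ((PySem.List.enumerate types).filter (fun p => p.2 == "ETHEREUMTRANSACTION")).map (fun p => p.1)
    let lastAppendIndex : Int :=
      (PySem.List.max? (((PySem.List.enumerate types).filter (fun p => p.2 == "FILEAPPEND")).map (fun p => p.1)) (fun x => x)).getD 0
    if filecreateIndex < lastAppendIndex ∧ lastAppendIndex < (PySem.List.min? ethIndices (fun x => x)).getD 0 ∧
       (PySem.List.min? ethIndices (fun x => x)).getD 0 < filedeleteIndex then
      let entityIds := PySem.Set.ofList
        ((sequence.filter (fun tx =>
            (["FILECREATE", "FILEAPPEND", "FILEDELETE"] : List String).contains (((PySem.Dict.mk tx).get? "type").getD ""))).map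
          (fun tx => ((PySem.Dict.mk tx).get? "entity_id").getD ""))
      if PySem.Set.len entityIds == 1 then (true, appendCount) else (false, appendCount)
    else (false, appendCount)
  else (false, appendCount)

-- ===== PORT B =====
-- the single scan: i, append_count, first-index options and last-append option
def pvScan : List (List (String × String)) → Int → Int → Option Int → Option Int → Option Int → Option Int →
    Int × Option Int × Option Int × Option Int × Option Int
  | [], _, cnt, c, e, d, la => (cnt, c, e, d, la)
  | tx :: rest, i, cnt, c, e, d, la =>
    let t := ((PySem.Dict.mk tx).get? "type").getD ""
    if t == "FILEAPPEND" then pvScan rest (i + 1) (cnt + 1) c e d (some i)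
    else if t == "FILECREATE" then pvScan rest (i + 1) cnt (if c.isNone then some i else c) e d la
    else if t == "ETHEREUMTRANSACTION" then pvScan rest (i + 1) cnt c (if e.isNone then some i else e) d la
    else if t == "FILEDELETE" then pvScan rest (i + 1) cnt c e (if d.isNone then some i else d) la
    else pvScan rest (i + 1) cnt c e d la

def is_valid_big_transaction_alt (sequence : List (List (String × String))) : Bool × Int :=
  match pvScan sequence 0 0 none none none none with
  | (cnt, c, e, d, la) =>
    match c, la, e, d with
    | some ci, some li, some ei, some di =>
      if ci < li ∧ li < ei ∧ ei < di then
        let entityIds := PySem.Set.ofList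
          ((sequence.filter (fun tx =>
              (["FILECREATE", "FILEAPPEND", "FILEDELETE"] : List String).contains (((PySem.Dict.mk tx).get? "type").getD ""))).map
            (fun tx => ((PySem.Dict.mk tx).get? "entity_id").getD ""))
        (PySem.Set.len entityIds == 1, cnt)
      else (false, cnt)
    | _, _, _, _ => (false, cnt)

-- ===== PRECONDITION & SPEC =====
-- Pre_ excludes the inputs where A can raise KeyError: a tx without a 'type' key, or — when all four
-- transaction types occur, so the entity-reading branch is reachable — a FILECREATE/FILEAPPEND/FILEDELETE
-- tx without an 'entity_id' key (slightly wider than the exact raising set, which also needs the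
-- ordering to hold — see cites).
def Pre_is_valid_big_transaction (sequence : List (List (String × String))) : Prop :=
  (sequence.all (fun tx => (PySem.Dict.mk tx).contains "type")) = true ∧
  ((let ts := sequence.map (fun tx => ((PySem.Dict.mk tx).get? "type").getD "")
    ts.contains "FILECREATE" && ts.contains "FILEAPPEND" &&
    ts.contains "ETHEREUMTRANSACTION" && ts.contains "FILEDELETE") = true →
   (sequence.all (fun tx =>
      !((["FILECREATE", "FILEAPPEND", "FILEDELETE"] : List String).contains
          (((PySem.Dict.mk tx).get? "type").getD "")) ||
        (PySem.Dict.mk tx).contains "entity_id")) = true)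
instance (sequence : List (List (String × String))) : Decidable (Pre_is_valid_big_transaction sequence) := by
  unfold Pre_is_valid_big_transaction; infer_instance

def pvWitness_is_valid_big_transaction : (List (List (String × String))) :=
  [[("type", "FILECREATE"), ("entity_id", "0.0.5")],
   [("type", "FILEAPPEND"), ("entity_id", "0.0.5")],
   [("type", "ETHEREUMTRANSACTION")],
   [("type", "FILEDELETE"), ("entity_id", "0.0.5")]]

def Spec_is_valid_big_transaction (sequence : List (List (String × String))) (out : Bool × Int) : Prop := out = is_valid_big_transaction_alt sequence
instance (sequence : List (List (String × String))) (out : Bool × Int) : Decidable (Spec_is_valid_big_transaction sequence out) := by unfold Spec_is_valid_big_transaction; infer_instance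

-- ===== CLAIM (what is proved, stated in full; the proofs are below) =====
def Claim_equal_is_valid_big_transaction : Prop := ∀ (sequence : List (List (String × String))), Dom_is_valid_big_transaction sequence → Pre_is_valid_big_transaction sequence → Spec_is_valid_big_transaction sequence (is_valid_big_transaction sequence)

-- ===== LEMMAS AND PROOFS =====

-- the type of a transaction, as both ports read it
def pvTy (tx : List (String × String)) : String := ((PySem.Dict.mk tx).get? "type").getD ""

-- first index of t in ts, 0-based positions shifted by i
def firstIdxI (ts : List String) (t : String) (i : Int) : Option Int :=
  (PySem.List.index? ts t).map (fun k => i + Int.ofNat k)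

-- last index of t in ts, positions shifted by i
def lastIdxI : List String → String → Int → Option Int
  | [], _, _ => none
  | x :: xs, t, i => (lastIdxI xs t (i + 1)).or (if x == t then some i else none)

theorem firstIdxI_cons (x : String) (xs : List String) (t : String) (i : Int) :
    firstIdxI (x :: xs) t i = if x = t then some i else firstIdxI xs t (i + 1) := by
  by_cases h : x = t
  · subst h; rw [firstIdxI, PySem.List.index?_cons_self]; simp
  · rw [firstIdxI, PySem.List.index?_cons_of_ne xs h, if_neg h, firstIdxI, Option.map_map]
    cases PySem.List.index? xs t with
    | none => rfl
    | some k =>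
      simp only [Option.map_some, Function.comp_apply, Option.some.injEq]
      simp [Int.ofNat_eq_natCast]; omega

theorem lastIdxI_isSome (ts : List String) (t : String) (i : Int) :
    (lastIdxI ts t i).isSome = true ↔ t ∈ ts := by
  induction ts generalizing i with
  | nil => simp [lastIdxI]
  | cons x xs ih =>
    simp only [lastIdxI, Option.isSome_or, Bool.or_eq_true, ih, List.mem_cons]
    by_cases h : x = t <;> simp [h] <;> tauto

theorem mem_of_lastIdxI (ts : List String) (t : String) (i : Int) (m : Int)
    (h : lastIdxI ts t i = some m) : t ∈ ts := by
  rw [← lastIdxI_isSome ts t i, h]; rfl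

theorem scan_spec (seq : List (List (String × String))) :
    ∀ (i cnt : Int) (c e d la : Option Int),
    pvScan seq i cnt c e d la =
      (cnt + (PySem.List.count (seq.map pvTy) "FILEAPPEND" : Int),
       c.or (firstIdxI (seq.map pvTy) "FILECREATE" i),
       e.or (firstIdxI (seq.map pvTy) "ETHEREUMTRANSACTION" i),
       d.or (firstIdxI (seq.map pvTy) "FILEDELETE" i),
       (lastIdxI (seq.map pvTy) "FILEAPPEND" i).or la) := by
  induction seq with
  | nil => intro i cnt c e d la; simp [pvScan, firstIdxI, lastIdxI, PySem.List.count]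
  | cons tx rest ih =>
    intro i cnt c e d la
    show (if pvTy tx == "FILEAPPEND" then pvScan rest (i + 1) (cnt + 1) c e d (some i)
      else if pvTy tx == "FILECREATE" then pvScan rest (i + 1) cnt (if c.isNone then some i else c) e d la
      else if pvTy tx == "ETHEREUMTRANSACTION" then pvScan rest (i + 1) cnt c (if e.isNone then some i else e) d la
      else if pvTy tx == "FILEDELETE" then pvScan rest (i + 1) cnt c e (if d.isNone then some i else d) la
      else pvScan rest (i + 1) cnt c e d la) = _
    have hmap : (tx :: rest).map pvTy = pvTy tx :: rest.map pvTy := rfl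
    rw [hmap]
    by_cases hA : pvTy tx = "FILEAPPEND"
    · simp only [hA, beq_self_eq_true, if_true, ih]
      refine Prod.ext ?_ (Prod.ext ?_ (Prod.ext ?_ (Prod.ext ?_ ?_))) <;>
        simp [PySem.List.count, firstIdxI_cons, lastIdxI]
      · ring
    · by_cases hC : pvTy tx = "FILECREATE"
      · simp only [hC, beq_self_eq_true, beq_iff_eq, if_true, ih]
        refine Prod.ext ?_ (Prod.ext ?_ (Prod.ext ?_ (Prod.ext ?_ ?_))) <;>
          simp [PySem.List.count, firstIdxI_cons, lastIdxI]
        · cases c <;> simp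
      · by_cases hE : pvTy tx = "ETHEREUMTRANSACTION"
        · simp only [hE, beq_self_eq_true, beq_iff_eq, if_true, ih]
          refine Prod.ext ?_ (Prod.ext ?_ (Prod.ext ?_ (Prod.ext ?_ ?_))) <;>
            simp [PySem.List.count, firstIdxI_cons, lastIdxI]
          · cases e <;> simp
        · by_cases hD : pvTy tx = "FILEDELETE"
          · simp only [hD, beq_self_eq_true, beq_iff_eq, if_true, ih]
            refine Prod.ext ?_ (Prod.ext ?_ (Prod.ext ?_ (Prod.ext ?_ ?_))) <;>
              simp [PySem.List.count, firstIdxI_cons, lastIdxI]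
            · cases d <;> simp
          · simp only [hA, hC, hE, hD, beq_iff_eq, if_false, ih]
            refine Prod.ext ?_ (Prod.ext ?_ (Prod.ext ?_ (Prod.ext ?_ ?_))) <;>
              simp [PySem.List.count, firstIdxI_cons, lastIdxI, hA, hC, hE, hD]

theorem foldl_min_of_le (l : List Int) (a : Int) (h : ∀ y ∈ l, a ≤ y) : l.foldl min a = a := by
  induction l with
  | nil => rfl
  | cons x xs ih =>
    have hax : min a x = a := min_eq_left (h x (List.mem_cons_self))
    simp only [List.foldl_cons, hax]
    exact ih (fun y hy => h y (List.mem_cons_of_mem _ hy))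

theorem foldl_max_eq (l : List Int) (a : Int) :
    l.foldl max a = match PySem.List.max? l (fun x => x) with | none => a | some m => max a m := by
  induction l generalizing a with
  | nil => rfl
  | cons x xs ih =>
    rw [PySem.List.max?_id_cons, List.foldl_cons, ih (max a x), ih x]
    cases hm : PySem.List.max? xs (fun y => y) with
    | none => rfl
    | some m => simp [max_assoc]

theorem mem_idx_ge (ts : List String) (t : String) (s y : Int)
    (hy : y ∈ ((PySem.List.enumerate ts s).filter (fun p => p.2 == t)).map (fun p => p.1)) : s ≤ y := by
  simp only [List.mem_map, List.mem_filter] at hy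
  obtain ⟨p, ⟨hp, _⟩, rfl⟩ := hy
  rw [PySem.List.mem_enumerate_iff] at hp
  obtain ⟨k, hk, rfl⟩ := hp
  simp

theorem min_filter_enumerate (ts : List String) (t : String) :
    ∀ s : Int, PySem.List.min? (((PySem.List.enumerate ts s).filter (fun p => p.2 == t)).map (fun p => p.1)) (fun x => x) =
      firstIdxI ts t s := by
  induction ts with
  | nil => intro s; simp [PySem.List.enumerate_nil, firstIdxI, PySem.List.index?]
  | cons x xs ih =>
    intro s
    rw [PySem.List.enumerate_cons, firstIdxI_cons]
    by_cases h : x = t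
    · simp only [h, List.filter_cons, beq_self_eq_true, if_true, List.map_cons,
        PySem.List.min?_id_cons, if_true]
      congr 1
      exact foldl_min_of_le _ s (fun y hy => by
        have := mem_idx_ge xs t (s + 1) y hy; omega)
    · simp only [List.filter_cons]
      have hcond : (((s, x) : Int × String).2 == t) = false := by simpa using h
      rw [hcond, if_neg h]
      simp only [Bool.false_eq_true, if_false]
      exact ih (s + 1)

theorem max_filter_enumerate (ts : List String) (t : String) :
    ∀ s : Int, PySem.List.max? (((PySem.List.enumerate ts s).filter (fun p => p.2 == t)).map (fun p => p.1)) (fun x => x) =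
      lastIdxI ts t s := by
  induction ts with
  | nil => intro s; simp [PySem.List.enumerate_nil, lastIdxI]
  | cons x xs ih =>
    intro s
    rw [PySem.List.enumerate_cons]
    by_cases h : x = t
    · simp only [List.filter_cons]
      have hcond : ((s, x).2 == t) = true := by simpa using h
      rw [hcond]
      simp only [if_true, List.map_cons, PySem.List.max?_id_cons]
      rw [foldl_max_eq, ih (s + 1)]
      cases hm : lastIdxI xs t (s + 1) with
      | none => simp [lastIdxI, hm, h]
      | some m =>
        have hmem : m ∈ ((PySem.List.enumerate xs (s + 1)).filter (fun p => p.2 == t)).map (fun p => p.1) := by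
          have := ih (s + 1); rw [hm] at this
          exact PySem.List.max?_mem this
        have hge : s + 1 ≤ m := mem_idx_ge xs t (s + 1) m hmem
        have hmax : max s m = m := by omega
        simp [lastIdxI, hm, h, hmax]
    · simp only [List.filter_cons]
      have hcond : ((s, x).2 == t) = false := by simpa using h
      rw [hcond]
      simp only [Bool.false_eq_true, if_false]
      rw [ih (s + 1)]
      simp [lastIdxI, h]

theorem count_pos_of_mem (ts : List String) (t : String) (h : t ∈ ts) :
    (1 : Int) ≤ (PySem.List.count ts t : Int) := by
  have : 0 < ts.count t := List.count_pos_iff.2 h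
  have : 0 < PySem.List.count ts t := by simpa [PySem.List.count] using this
  omega

-- ===== VERDICT (by name: the statement is the Claim_ definition above) =====
theorem is_valid_big_transaction_spec : Claim_equal_is_valid_big_transaction := by
  intro sequence _ _
  unfold Spec_is_valid_big_transaction
  unfold is_valid_big_transaction is_valid_big_transaction_alt
  rw [scan_spec]
  have hmap : sequence.map (fun tx => ((PySem.Dict.mk tx).get? "type").getD "") = sequence.map pvTy := rfl
  rw [hmap]
  simp only [Option.none_or, Option.or_none, zero_add]
  rw [min_filter_enumerate, max_filter_enumerate]
  generalize hts : sequence.map pvTy = ts at *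
  cases hc : PySem.List.index? ts "FILECREATE" with
  | none =>
    have hCc : ts.contains "FILECREATE" = false := by
      cases hcc : ts.contains "FILECREATE"
      · rfl
      · exact absurd (List.mem_of_elem_eq_true hcc)
          ((PySem.List.index?_eq_none_iff ts "FILECREATE").1 hc)
    rw [hCc]
    simp only [Bool.false_and, Bool.false_eq_true, if_false, firstIdxI, hc, Option.map_none]
  | some k1 =>
    cases hl : lastIdxI ts "FILEAPPEND" 0 with
    | none =>
      have hnm : "FILEAPPEND" ∉ ts := by
        intro hmem; rw [← lastIdxI_isSome ts "FILEAPPEND" 0, hl] at hmem; exact absurd hmem (by simp)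
      have hcnt : PySem.List.count ts "FILEAPPEND" = 0 := by
        simp only [PySem.List.count, List.count_eq_zero]
        exact hnm
      have hdec : decide ((1 : Int) ≤ ((PySem.List.count ts "FILEAPPEND" : Nat) : Int)) = false := by
        rw [hcnt]; decide
      rw [hdec]
      simp only [Bool.and_false, Bool.false_and, Bool.false_eq_true, if_false, firstIdxI, hc,
        Option.map_some]
    | some l =>
      cases he : PySem.List.index? ts "ETHEREUMTRANSACTION" with
      | none =>
        have hEc : ts.contains "ETHEREUMTRANSACTION" = false := by
          cases hcc : ts.contains "ETHEREUMTRANSACTION"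
          · rfl
          · exact absurd (List.mem_of_elem_eq_true hcc)
              ((PySem.List.index?_eq_none_iff ts "ETHEREUMTRANSACTION").1 he)
        rw [hEc]
        simp only [Bool.and_false, Bool.false_and, Bool.false_eq_true, if_false, firstIdxI, hc,
          he, Option.map_some, Option.map_none]
      | some k2 =>
        cases hd : PySem.List.index? ts "FILEDELETE" with
        | none =>
          have hDc : ts.contains "FILEDELETE" = false := by
            cases hcc : ts.contains "FILEDELETE"
            · rfl
            · exact absurd (List.mem_of_elem_eq_true hcc)
                ((PySem.List.index?_eq_none_iff ts "FILEDELETE").1 hd)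
          rw [hDc]
          simp only [Bool.and_false, Bool.false_eq_true, if_false, firstIdxI, hc, he, hd,
            Option.map_some, Option.map_none]
        | some k3 =>
          have hCc : ts.contains "FILECREATE" = true :=
            List.elem_eq_true_of_mem (by rw [← PySem.List.index?_isSome_iff, hc]; rfl)
          have hEc : ts.contains "ETHEREUMTRANSACTION" = true :=
            List.elem_eq_true_of_mem (by rw [← PySem.List.index?_isSome_iff, he]; rfl)
          have hDc : ts.contains "FILEDELETE" = true :=
            List.elem_eq_true_of_mem (by rw [← PySem.List.index?_isSome_iff, hd]; rfl)
          have hcnt : decide ((1 : Int) ≤ ((PySem.List.count ts "FILEAPPEND" : Nat) : Int)) = true := by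
            have := count_pos_of_mem ts "FILEAPPEND" (mem_of_lastIdxI ts "FILEAPPEND" 0 l hl)
            simpa using this
          rw [hCc, hEc, hDc, hcnt]
          simp only [Bool.and_self, if_true, firstIdxI, hc, he,
            hd, Option.map_some, Option.getD_some, Int.ofNat_eq_natCast, zero_add]
          split_ifs with hord hlen
          · rw [hlen]
          · rw [Bool.not_eq_true] at hlen
            rw [hlen]
          · rfl
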